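-- pv_equiv track=rewrite | github.com/chenhh/Uva | uva_750_queen.py | queens_with_a_fixed_position
-- ===== SOURCE A (Python) =====
-- def queens_with_a_fixed_position(x, y, n_queen=8):
--     """
--     backtracking, searching by row first then by column.
--     the size of the board is n_row * n_col (rdx from 0 to n_row -1 (n_col - 1)
--     if there is a queen placed in board[rdx][cdx], then
--         the rdx row, the cdx column, the diagonal (rdx+cdx)%(2*(n_col)-1), and
--         the diagonal ((rdx-cdx)+(2*(n_col)-1))%((2*(n_col)-1) can't place
--         another queen.
--
--     x, y is the location of a given queen.
--     """
--     # square chessboard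
--     n_row = n_col = n_queen
--     d_size = (2 * n_col - 1)
--     ans = []
--
--     # initial condition
--     i_cols = [False] * n_col
--     i_cols[y] = True
--     i_lefts, i_rights = [False] * d_size, [False] * d_size
--     i_lefts[(x + y) % d_size], i_rights[(x - y) % d_size] = True, True
--
--     # (rdx, cols, left_diagonal, right_diagonal, positions)
--     stack = [(0, i_cols, i_lefts, i_rights, [(x, y)])]
--
--     while stack:
--         rdx, cols, lefts, rights, positions = stack.pop()
--         # print (rdx, cols, positions)
--         if rdx >= n_row:
--             # because the xth row will not be checked, there are only
--             # n_row -1 rows need to be checked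
--             if len(positions) == n_queen:
--                 ans.append(positions)
--             continue
--
--         if rdx == x:
--             stack.append((rdx + 1, cols[:], lefts[:], rights[:],
--                           positions[:]))
--             continue
--
--         for cdx in range(n_col):
--             l_idx, r_idx = (rdx + cdx) % d_size, (rdx - cdx) % d_size
--             if not any((cols[cdx], lefts[l_idx], rights[r_idx])):
--                 # the position can place a new queen
--                 cols[cdx], lefts[l_idx], rights[r_idx] = True, True, True
--                 stack.append((rdx + 1, cols[:], lefts[:], rights[:],
--                               positions + [(rdx, cdx)]))
--                 # the position does not place a new queen
--                 cols[cdx], lefts[l_idx], rights[r_idx] = False, False, False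
--     return ans
-- ===== SOURCE B (Python) =====
-- def queens_with_a_fixed_position(x, y, n_queen=8):
--     """
--     Recursive backtracking with in-place flag arrays and undo (no list
--     copies), iterating columns in descending order so solutions come out
--     in the same order as the explicit-stack LIFO search.
--     """
--     n_row = n_col = n_queen
--     d_size = 2 * n_col - 1
--     cols = [False] * n_col
--     cols[y] = True
--     lefts = [False] * d_size
--     rights = [False] * d_size
--     lefts[(x + y) % d_size] = True
--     rights[(x - y) % d_size] = True
--
--     ans = []
--
--     def place(rdx, positions):
--         if rdx >= n_row:
--             if len(positions) == n_queen:
--                 ans.append(positions)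
--             return
--         if rdx == x:
--             place(rdx + 1, positions)
--             return
--         for cdx in reversed(range(n_col)):
--             l_idx, r_idx = (rdx + cdx) % d_size, (rdx - cdx) % d_size
--             if not (cols[cdx] or lefts[l_idx] or rights[r_idx]):
--                 cols[cdx] = lefts[l_idx] = rights[r_idx] = True
--                 place(rdx + 1, positions + [(rdx, cdx)])
--                 cols[cdx] = lefts[l_idx] = rights[r_idx] = False
--
--     place(0, [(x, y)])
--     return ans
-- ===== Notes on version B (the rewrite author's own statement) =====
-- stated objective: alternative
-- what changed: Replaced the explicit-stack loop that copies all flag arrays and positions for every pushed frame with a recursive backtracker that mutates shared flag arrays in place and undoes the marks after each recursive call, scanning columns in descending order to keep the LIFO solution order.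
import Mathlib
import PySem

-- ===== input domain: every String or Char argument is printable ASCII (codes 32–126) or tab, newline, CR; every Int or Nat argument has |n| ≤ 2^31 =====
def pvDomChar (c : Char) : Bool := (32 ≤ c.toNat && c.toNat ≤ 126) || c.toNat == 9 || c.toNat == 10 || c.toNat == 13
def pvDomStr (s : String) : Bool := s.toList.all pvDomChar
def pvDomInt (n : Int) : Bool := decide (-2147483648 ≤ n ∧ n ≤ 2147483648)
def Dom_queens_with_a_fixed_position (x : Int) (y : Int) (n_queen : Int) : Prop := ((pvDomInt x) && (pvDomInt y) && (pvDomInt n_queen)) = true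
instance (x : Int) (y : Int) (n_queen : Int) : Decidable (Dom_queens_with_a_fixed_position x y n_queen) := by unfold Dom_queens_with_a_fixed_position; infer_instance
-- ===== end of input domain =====

-- B replaces A's explicit stack (which copies every flag array per pushed frame) by a
-- recursive backtracker over shared flag state, scanning columns descending to keep A's
-- LIFO solution order; equal output on every input where A returns (Pre_).


-- ===== PORT A =====
-- shared loop-body expressions (both Pythons compute literally these): the "not any(...)" free test
-- and the three updated flag arrays / child frame of the inner loop body.
def qFree (d_size rdx cdx : Int) (cols lefts rights : List Bool) : Bool :=
  ¬ (PySem.List.pyGetD cols cdx false ||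
     PySem.List.pyGetD lefts (PySem.Int.mod (rdx + cdx) d_size) false ||
     PySem.List.pyGetD rights (PySem.Int.mod (rdx - cdx) d_size) false)

def qChild (d_size rdx cdx : Int) (cols lefts rights : List Bool)
    (positions : List (Int × Int)) :
    Int × List Bool × List Bool × List Bool × List (Int × Int) :=
  (rdx + 1,
   PySem.List.pySetD cols cdx true,
   PySem.List.pySetD lefts (PySem.Int.mod (rdx + cdx) d_size) true,
   PySem.List.pySetD rights (PySem.Int.mod (rdx - cdx) d_size) true,
   positions ++ [(rdx, cdx)])

-- A's inner for-loop: push each admissible child frame onto the stack (ascending cdx).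
def qPush (n_col d_size rdx : Int) (cols lefts rights : List Bool)
    (positions : List (Int × Int))
    (stack : List (Int × List Bool × List Bool × List Bool × List (Int × Int))) :
    List (Int × List Bool × List Bool × List Bool × List (Int × Int)) :=
  (PySem.List.pyRange 0 n_col 1).foldl
    (fun st cdx =>
      if qFree d_size rdx cdx cols lefts rights then
        qChild d_size rdx cdx cols lefts rights positions :: st
      else st)
    stack

-- A's while loop; the Nat fuel is a totality guard only (the top-level call passes
-- provably sufficient fuel, see lemmas below).
def qRun (x n_row n_col d_size n_queen : Int) :
    Nat → List (Int × List Bool × List Bool × List Bool × List (Int × Int)) →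
    List (List (Int × Int)) → List (List (Int × Int))
  | 0, _, ans => ans
  | _ + 1, [], ans => ans
  | fuel + 1, (rdx, cols, lefts, rights, positions) :: s, ans =>
    if rdx ≥ n_row then
      qRun x n_row n_col d_size n_queen fuel s
        (if (positions.length : Int) = n_queen then ans ++ [positions] else ans)
    else if rdx = x then
      qRun x n_row n_col d_size n_queen fuel ((rdx + 1, cols, lefts, rights, positions) :: s) ans
    else
      qRun x n_row n_col d_size n_queen fuel
        (qPush n_col d_size rdx cols lefts rights positions s) ans

def queens_with_a_fixed_position (x : Int) (y : Int) (n_queen : Int) : List (List (Int × Int)) :=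
  let n_row := n_queen
  let n_col := n_queen
  let d_size := 2 * n_col - 1
  let i_cols := PySem.List.pySetD (List.replicate n_col.toNat false) y true
  let i_lefts := PySem.List.pySetD (List.replicate d_size.toNat false)
      (PySem.Int.mod (x + y) d_size) true
  let i_rights := PySem.List.pySetD (List.replicate d_size.toNat false)
      (PySem.Int.mod (x - y) d_size) true
  qRun x n_row n_col d_size n_queen
    ((n_queen.toNat + 2) ^ ((n_queen + 1).toNat))
    [(0, i_cols, i_lefts, i_rights, [(x, y)])] []

-- ===== PORT B =====
-- B's recursive place(): in Source B the arrays are mutated then restored after the recursive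
-- call; here the updated arrays are passed down and the originals kept for the rest of the
-- loop, which is the same computation.
def qPlace (x n_queen d_size : Int) (rdx : Int) (cols lefts rights : List Bool)
    (positions : List (Int × Int)) : List (List (Int × Int)) :=
  if _h : rdx ≥ n_queen then
    if (positions.length : Int) = n_queen then [positions] else []
  else if rdx = x then
    qPlace x n_queen d_size (rdx + 1) cols lefts rights positions
  else
    ((PySem.List.pyRange 0 n_queen 1).reverse).foldl
      (fun acc cdx =>
        if qFree d_size rdx cdx cols lefts rights then
          acc ++ qPlace x n_queen d_size (rdx + 1)
            (PySem.List.pySetD cols cdx true)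
            (PySem.List.pySetD lefts (PySem.Int.mod (rdx + cdx) d_size) true)
            (PySem.List.pySetD rights (PySem.Int.mod (rdx - cdx) d_size) true)
            (positions ++ [(rdx, cdx)])
        else acc)
      []
termination_by (n_queen - rdx).toNat
decreasing_by
  · omega
  · omega

def queens_with_a_fixed_position_alt (x : Int) (y : Int) (n_queen : Int) : List (List (Int × Int)) :=
  let d_size := 2 * n_queen - 1
  let cols := PySem.List.pySetD (List.replicate n_queen.toNat false) y true
  let lefts := PySem.List.pySetD (List.replicate d_size.toNat false)
      (PySem.Int.mod (x + y) d_size) true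
  let rights := PySem.List.pySetD (List.replicate d_size.toNat false)
      (PySem.Int.mod (x - y) d_size) true
  qPlace x n_queen d_size 0 cols lefts rights [(x, y)]

-- ===== PRECONDITION & SPEC =====
-- Pre_: exactly the inputs where Python A returns (n_queen ≥ 1 so the boards are non-empty,
-- and y a valid Python index into a list of length n_queen; otherwise i_cols[y] raises IndexError).
def Pre_queens_with_a_fixed_position (x : Int) (y : Int) (n_queen : Int) : Prop :=
  1 ≤ n_queen ∧ -n_queen ≤ y ∧ y < n_queen
instance (x : Int) (y : Int) (n_queen : Int) : Decidable (Pre_queens_with_a_fixed_position x y n_queen) := by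
  unfold Pre_queens_with_a_fixed_position; infer_instance

def pvWitness_queens_with_a_fixed_position : Int × Int × Int := (0, 1, 5)

def Spec_queens_with_a_fixed_position (x : Int) (y : Int) (n_queen : Int) (out : List (List (Int × Int))) : Prop := out = queens_with_a_fixed_position_alt x y n_queen
instance (x : Int) (y : Int) (n_queen : Int) (out : List (List (Int × Int))) : Decidable (Spec_queens_with_a_fixed_position x y n_queen out) := by unfold Spec_queens_with_a_fixed_position; infer_instance

-- ===== CLAIM (what is proved, stated in full; the proofs are below) =====
def Claim_equal_queens_with_a_fixed_position : Prop := ∀ (x : Int) (y : Int) (n_queen : Int), Dom_queens_with_a_fixed_position x y n_queen → Pre_queens_with_a_fixed_position x y n_queen → Spec_queens_with_a_fixed_position x y n_queen (queens_with_a_fixed_position x y n_queen)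

-- ===== LEMMAS AND PROOFS =====

-- potential of a stack: fuel this many pops always suffices
def qPot (n : Int) (s : List (Int × List Bool × List Bool × List Bool × List (Int × Int))) : Nat :=
  (s.map (fun f => (n.toNat + 2) ^ ((n + 1 - f.1).toNat))).sum

lemma foldl_consIf {α β : Type} (p : α → Bool) (g : α → β) :
    ∀ (xs : List α) (s : List β),
      xs.foldl (fun st c => if p c then g c :: st else st) s
        = ((xs.filter p).map g).reverse ++ s := by
  intro xs
  induction xs with
  | nil => intro s; simp
  | cons a xs ih =>
    intro s
    by_cases h : p a <;> simp [List.foldl_cons, h, ih]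

lemma foldl_appendIf {α β : Type} (p : α → Bool) (g : α → List β) :
    ∀ (xs : List α) (a : List β),
      xs.foldl (fun acc c => if p c then acc ++ g c else acc) a
        = a ++ ((xs.filter p).map g).flatten := by
  intro xs
  induction xs with
  | nil => intro a; simp
  | cons c xs ih =>
    intro a
    by_cases h : p c <;> simp [List.foldl_cons, h, ih]

-- the three unfolding equations of qPlace, one per branch of Source B's place()
lemma qPlace_base (x n d rdx : Int) (cols lefts rights : List Bool)
    (pos : List (Int × Int)) (h : rdx ≥ n) :
    qPlace x n d rdx cols lefts rights pos
      = if (pos.length : Int) = n then [pos] else [] := by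
  rw [qPlace.eq_def]; simp [h]

lemma qPlace_skip (x n d rdx : Int) (cols lefts rights : List Bool)
    (pos : List (Int × Int)) (h : ¬ rdx ≥ n) (h2 : rdx = x) :
    qPlace x n d rdx cols lefts rights pos
      = qPlace x n d (rdx + 1) cols lefts rights pos := by
  conv_lhs => rw [qPlace.eq_def]
  rw [dif_neg h, if_pos h2]

lemma qPlace_row (x n d rdx : Int) (cols lefts rights : List Bool)
    (pos : List (Int × Int)) (h : ¬ rdx ≥ n) (h2 : ¬ rdx = x) :
    qPlace x n d rdx cols lefts rights pos
      = ((((PySem.List.pyRange 0 n 1).reverse.filter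
            (fun cdx => qFree d rdx cdx cols lefts rights)).map
          (fun cdx => qPlace x n d (rdx + 1)
            (PySem.List.pySetD cols cdx true)
            (PySem.List.pySetD lefts (PySem.Int.mod (rdx + cdx) d) true)
            (PySem.List.pySetD rights (PySem.Int.mod (rdx - cdx) d) true)
            (pos ++ [(rdx, cdx)]))).flatten) := by
  conv_lhs => rw [qPlace.eq_def]
  rw [dif_neg h, if_neg h2, foldl_appendIf]
  simp

-- the key invariant: with enough fuel, the stack machine appends, in pop (LIFO) order,
-- exactly the recursive results of each frame.
lemma qRun_eq (x n d : Int) :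
    ∀ (fuel : Nat) (s : List (Int × List Bool × List Bool × List Bool × List (Int × Int)))
      (ans : List (List (Int × Int))),
      (∀ f ∈ s, f.1 ≤ n) → qPot n s ≤ fuel →
      qRun x n n d n fuel s ans
        = ans ++ (s.map (fun f => qPlace x n d f.1 f.2.1 f.2.2.1 f.2.2.2.1 f.2.2.2.2)).flatten := by
  intro fuel
  induction fuel with
  | zero =>
    intro s ans _ hpot
    cases s with
    | nil => simp [qRun]
    | cons f s => simp [qPot] at hpot
  | succ fuel ih =>
    intro s ans hmem hpot
    cases s with
    | nil => simp [qRun]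
    | cons f s =>
      obtain ⟨rdx, cols, lefts, rights, pos⟩ := f
      have hr : rdx ≤ n := hmem _ (List.Mem.head _)
      have hmem' : ∀ f ∈ s, f.1 ≤ n := fun f hf => hmem f (List.mem_cons_of_mem _ hf)
      have hP1 : 1 ≤ (n.toNat + 2) ^ ((n - rdx).toNat) := Nat.one_le_pow _ _ (by omega)
      have hsplit : (n + 1 - rdx).toNat = (n - rdx).toNat + 1 := by omega
      have hpot' : qPot n ((rdx, cols, lefts, rights, pos) :: s)
          = (n.toNat + 2) ^ ((n - rdx).toNat) * (n.toNat + 2) + qPot n s := by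
        simp [qPot, hsplit, Nat.pow_succ]
      simp only [List.map_cons, List.flatten_cons]
      by_cases hge : rdx ≥ n
      · rw [show qRun x n n d n (fuel + 1) ((rdx, cols, lefts, rights, pos) :: s) ans
            = qRun x n n d n fuel s
                (if (pos.length : Int) = n then ans ++ [pos] else ans) from by
          simp only [qRun]
          rw [if_pos hge]]
        rw [ih s _ hmem' (by rw [hpot'] at hpot; nlinarith)]
        rw [qPlace_base x n d rdx cols lefts rights pos hge]
        split_ifs <;> simp
      · have hx1 : (n + 1 - (rdx + 1)).toNat = (n - rdx).toNat := by omega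
        by_cases hx : rdx = x
        · rw [show qRun x n n d n (fuel + 1) ((rdx, cols, lefts, rights, pos) :: s) ans
              = qRun x n n d n fuel ((rdx + 1, cols, lefts, rights, pos) :: s) ans from by
            simp only [qRun]
            rw [if_neg hge, if_pos hx]]
          rw [ih _ _ (by
              intro f hf
              rcases List.mem_cons.mp hf with h | h
              · subst h; simpa using by omega
              · exact hmem' f h)
            (by
              have hq : qPot n ((rdx + 1, cols, lefts, rights, pos) :: s)
                  = (n.toNat + 2) ^ ((n - rdx).toNat) + qPot n s := by
                simp only [qPot, List.map_cons, List.sum_cons, hx1]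
              rw [hq]; rw [hpot'] at hpot; nlinarith)]
          rw [qPlace_skip x n d rdx cols lefts rights pos hge hx]
          simp
        · rw [show qRun x n n d n (fuel + 1) ((rdx, cols, lefts, rights, pos) :: s) ans
              = qRun x n n d n fuel (qPush n d rdx cols lefts rights pos s) ans from by
            simp only [qRun]
            rw [if_neg hge, if_neg hx]]
          have hpush : qPush n d rdx cols lefts rights pos s
              = (((PySem.List.pyRange 0 n 1).filter
                    (fun cdx => qFree d rdx cdx cols lefts rights)).map
                  (fun cdx => qChild d rdx cdx cols lefts rights pos)).reverse ++ s := by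
            simp only [qPush]
            exact foldl_consIf _ _ _ _
          have hlenf : ((PySem.List.pyRange 0 n 1).filter
              (fun cdx => qFree d rdx cdx cols lefts rights)).length ≤ n.toNat := by
            have := List.length_filter_le (fun cdx => qFree d rdx cdx cols lefts rights)
              (PySem.List.pyRange 0 n 1)
            simpa [pysem] using this
          rw [hpush]
          rw [ih _ _ (by
              intro f hf
              rcases List.mem_append.mp hf with h | h
              · rcases List.mem_reverse.mp h with h
                rcases List.mem_map.mp h with ⟨cdx, _, rfl⟩
                simp [qChild]; omega
              · exact hmem' f h)
            (by
              have hq : qPot n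
                  ((((PySem.List.pyRange 0 n 1).filter
                        (fun cdx => qFree d rdx cdx cols lefts rights)).map
                      (fun cdx => qChild d rdx cdx cols lefts rights pos)).reverse ++ s)
                  = ((PySem.List.pyRange 0 n 1).filter
                        (fun cdx => qFree d rdx cdx cols lefts rights)).length
                      * (n.toNat + 2) ^ ((n - rdx).toNat) + qPot n s := by
                simp only [qPot, List.map_append, List.sum_append, List.map_reverse,
                  List.map_map, Function.comp_def, qChild, hx1, List.sum_reverse,
                  List.map_const', List.sum_replicate, smul_eq_mul]
              rw [hq]; rw [hpot'] at hpot; nlinarith)]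
          rw [qPlace_row x n d rdx cols lefts rights pos hge hx]
          simp [List.map_reverse, List.map_map, List.filter_reverse, Function.comp_def, qChild]


-- ===== VERDICT (by name: the statement is the Claim_ definition above) =====
theorem queens_with_a_fixed_position_spec : Claim_equal_queens_with_a_fixed_position := by
  intro x y n _hdom hpre
  obtain ⟨hn, _hy1, _hy2⟩ := hpre
  unfold Spec_queens_with_a_fixed_position
  simp only [queens_with_a_fixed_position, queens_with_a_fixed_position_alt]
  rw [qRun_eq x n (2 * n - 1) _ _ []
    (by intro f hf; rcases List.mem_singleton.mp hf with rfl; simpa using by omega)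
    (by simp [qPot])]
  simp
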